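-- pv_equiv track=rewrite | github.com/weiiiworkk-dev/Axelo_JSReverse | axelo/models/signature.py | _dedupe_casefold_map
-- ===== SOURCE A (Python) =====
-- from typing import Any, Literal
--
-- def _dedupe_casefold_map(mapping: dict[str, Any]) -> dict[str, Any]:
--     deduped: dict[str, Any] = {}
--     index: dict[str, str] = {}
--     for key, value in (mapping or {}).items():
--         text = str(key or "").strip()
--         if not text:
--             continue
--         marker = text.casefold()
--         if marker not in index:
--             index[marker] = text
--             deduped[text] = value
--             continue
--         existing_key = index[marker]
--         existing_value = deduped.get(existing_key)
--         if existing_value in (None, "", [], {}) and value not in (None, "", [], {}):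
--             deduped[existing_key] = value
--     return deduped
-- ===== SOURCE B (Python) =====
-- def _is_blank(v):
--     return v in (None, "", [], {})
--
-- def _dedupe_casefold_map(mapping):
--     # pass 1: group entries by casefolded key, remembering the first canonical text
--     groups = {}
--     for key, value in (mapping or {}).items():
--         text = str(key or "").strip()
--         if not text:
--             continue
--         marker = text.casefold()
--         if marker in groups:
--             canonical, values = groups[marker]
--             groups[marker] = (canonical, values + [value])
--         else:
--             groups[marker] = (text, [value])
--     # pass 2: per group, keep the first value unless it is blank, then the first non-blank one
--     deduped = {}
--     for canonical, values in groups.values():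
--         chosen = values[0]
--         if _is_blank(chosen):
--             for candidate in values[1:]:
--                 if not _is_blank(candidate):
--                     chosen = candidate
--                     break
--         deduped[canonical] = chosen
--     return deduped
-- ===== Notes on version B (the rewrite author's own statement) =====
-- stated objective: alternative
-- what changed: A's single pass that patches the output dict in place is replaced by a two-phase group-then-resolve: first group all values per casefolded key (recording the first non-blank stripped text as canonical key), then pick each group's first value, or its first non-blank value when that one is blank.
import Mathlib
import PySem

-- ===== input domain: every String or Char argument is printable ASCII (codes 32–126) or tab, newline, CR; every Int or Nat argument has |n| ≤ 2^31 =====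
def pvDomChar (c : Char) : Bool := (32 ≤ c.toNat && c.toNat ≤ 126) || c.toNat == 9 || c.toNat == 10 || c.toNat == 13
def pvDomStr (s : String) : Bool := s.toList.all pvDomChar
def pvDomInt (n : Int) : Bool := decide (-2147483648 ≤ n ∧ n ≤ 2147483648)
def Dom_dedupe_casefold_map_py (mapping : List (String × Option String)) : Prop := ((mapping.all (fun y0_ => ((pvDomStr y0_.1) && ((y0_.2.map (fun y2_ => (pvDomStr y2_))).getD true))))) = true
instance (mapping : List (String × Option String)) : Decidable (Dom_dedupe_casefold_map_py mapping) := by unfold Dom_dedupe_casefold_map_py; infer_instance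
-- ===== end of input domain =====

-- B replaces A's single in-place-updating pass by a group-then-resolve decomposition:
-- first collect, per casefolded key, the canonical text and all values, then pick each
-- group's first non-blank value (falling back to its first value).  Objective: alternative.
-- (casefold is ported as ASCII lower; the stated Dom restricts inputs to ASCII.)

-- ===== PORT A =====
def dedupe_casefold_map_py (mapping : List (String × Option String)) : List (String × Option String) :=
  ((PySem.Dict.ofList mapping).items.foldl
    (fun (st : PySem.Dict String (Option String) × PySem.Dict String String) kv =>
      let deduped := st.1
      let index := st.2
      let text := PySem.Str.strip (if kv.1 == "" then "" else kv.1)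
      if text == "" then st
      else
        let marker := PySem.Str.lower text
        if !(index.contains marker) then
          (deduped.insert text kv.2, index.insert marker text)
        else
          let existing_key := (index.get? marker).getD ""
          let existing_value := (deduped.get? existing_key).getD none
          if (existing_value == none || existing_value == some "")
             && !(kv.2 == none || kv.2 == some "") then
            (deduped.insert existing_key kv.2, index)
          else st)
    (PySem.Dict.empty, PySem.Dict.empty)).1.items

-- ===== PORT B =====
def pvIsBlank (v : Option String) : Bool := v == none || v == some ""

def pvFirstNonBlank (chosen : Option String) : List (Option String) → Option String
  | [] => chosen
  | c :: cs => if !(pvIsBlank c) then c else pvFirstNonBlank chosen cs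

def pvChoose (values : List (Option String)) : Option String :=
  let chosen := (PySem.List.pyGet? values 0).getD none
  if pvIsBlank chosen then pvFirstNonBlank chosen (PySem.List.slice values (some 1) none)
  else chosen

def dedupe_casefold_map_py_alt (mapping : List (String × Option String)) : List (String × Option String) :=
  let groups := (PySem.Dict.ofList mapping).items.foldl
    (fun (groups : PySem.Dict String (String × List (Option String))) kv =>
      let text := PySem.Str.strip (if kv.1 == "" then "" else kv.1)
      if text == "" then groups
      else
        let marker := PySem.Str.lower text
        if groups.contains marker then
          let g := (groups.get? marker).getD ("", [])
          groups.insert marker (g.1, g.2 ++ [kv.2])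
        else
          groups.insert marker (text, [kv.2]))
    PySem.Dict.empty
  (groups.values.foldl
    (fun (deduped : PySem.Dict String (Option String)) g => deduped.insert g.1 (pvChoose g.2))
    PySem.Dict.empty).items

-- ===== PRECONDITION & SPEC =====
def Spec_dedupe_casefold_map_py (mapping : List (String × Option String)) (out : List (String × Option String)) : Prop := out = dedupe_casefold_map_py_alt mapping
instance (mapping : List (String × Option String)) (out : List (String × Option String)) : Decidable (Spec_dedupe_casefold_map_py mapping out) := by unfold Spec_dedupe_casefold_map_py; infer_instance

-- ===== CLAIM (what is proved, stated in full; the proofs are below) =====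
def Claim_equal_dedupe_casefold_map_py : Prop := ∀ (mapping : List (String × Option String)), Dom_dedupe_casefold_map_py mapping → Spec_dedupe_casefold_map_py mapping (dedupe_casefold_map_py mapping)

-- ===== LEMMAS AND PROOFS =====

-- A's loop body, named for the induction
def pvAStep (st : PySem.Dict String (Option String) × PySem.Dict String String)
    (kv : String × Option String) : PySem.Dict String (Option String) × PySem.Dict String String :=
  let deduped := st.1
  let index := st.2
  let text := PySem.Str.strip (if kv.1 == "" then "" else kv.1)
  if text == "" then st
  else
    let marker := PySem.Str.lower text
    if !(index.contains marker) then
      (deduped.insert text kv.2, index.insert marker text)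
    else
      let existing_key := (index.get? marker).getD ""
      let existing_value := (deduped.get? existing_key).getD none
      if (existing_value == none || existing_value == some "")
         && !(kv.2 == none || kv.2 == some "") then
        (deduped.insert existing_key kv.2, index)
      else st

-- B's grouping loop body
def pvBStep (groups : PySem.Dict String (String × List (Option String)))
    (kv : String × Option String) : PySem.Dict String (String × List (Option String)) :=
  let text := PySem.Str.strip (if kv.1 == "" then "" else kv.1)
  if text == "" then groups
  else
    let marker := PySem.Str.lower text
    if groups.contains marker then
      let g := (groups.get? marker).getD ("", [])
      groups.insert marker (g.1, g.2 ++ [kv.2])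
    else
      groups.insert marker (text, [kv.2])

lemma a_eq (m : List (String × Option String)) :
    dedupe_casefold_map_py m
      = ((PySem.Dict.ofList m).items.foldl pvAStep (PySem.Dict.empty, PySem.Dict.empty)).1.items := rfl

lemma b_eq (m : List (String × Option String)) :
    dedupe_casefold_map_py_alt m
      = (((PySem.Dict.ofList m).items.foldl pvBStep PySem.Dict.empty).values.foldl
          (fun (d : PySem.Dict String (Option String)) g => d.insert g.1 (pvChoose g.2))
          PySem.Dict.empty).items := rfl

-- the invariant tying A's (deduped, index) to B's groups
def pvInv (gr : PySem.Dict String (String × List (Option String)))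
    (dd : PySem.Dict String (Option String)) (ix : PySem.Dict String String) : Prop :=
  ix.items = gr.items.map (fun p => (p.1, p.2.1)) ∧
  dd.items = gr.items.map (fun p => (p.2.1, pvChoose p.2.2)) ∧
  gr.keys.Nodup ∧
  (∀ p ∈ gr.items, PySem.Str.lower p.2.1 = p.1 ∧ p.2.2 ≠ [])

lemma choose_cons (v : Option String) (vs : List (Option String)) :
    pvChoose (v :: vs) = if pvIsBlank v then pvFirstNonBlank v vs else v := by
  simp [pvChoose, PySem.List.pyGet?, PySem.List.pyIdx?, PySem.List.slice]

lemma scan_append (v w : Option String) (rest : List (Option String)) (hv : pvIsBlank v = true) :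
    pvFirstNonBlank v (rest ++ [w])
      = if pvIsBlank (pvFirstNonBlank v rest) && !(pvIsBlank w) then w
        else pvFirstNonBlank v rest := by
  induction rest with
  | nil => simp [pvFirstNonBlank, hv]
  | cons c cs ih =>
      by_cases h : pvIsBlank c <;> simp [pvFirstNonBlank, h, ih]

lemma choose_append (v w : Option String) (vs : List (Option String)) :
    pvChoose ((v :: vs) ++ [w])
      = if pvIsBlank (pvChoose (v :: vs)) && !(pvIsBlank w) then w else pvChoose (v :: vs) := by
  by_cases hv : pvIsBlank v
  · simp [choose_cons, hv, scan_append v w vs hv]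
  · simp [choose_cons, hv]

lemma choose_singleton (v : Option String) : pvChoose [v] = v := by
  by_cases h : pvIsBlank v <;> simp [choose_cons, pvFirstNonBlank, h]

lemma canon_nodup (gr : PySem.Dict String (String × List (Option String)))
    (hnd : gr.keys.Nodup) (hent : ∀ p ∈ gr.items, PySem.Str.lower p.2.1 = p.1 ∧ p.2.2 ≠ []) :
    (gr.items.map (fun p => p.2.1)).Nodup := by
  have h1 : gr.items.map (fun p => p.1) = (gr.items.map (fun p => p.2.1)).map PySem.Str.lower := by
    rw [List.map_map]
    exact (List.map_congr_left (fun p hp => ((hent p hp).1).symm))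
  have : ((gr.items.map (fun p => p.2.1)).map PySem.Str.lower).Nodup := by
    rw [← h1]; exact hnd
  exact this.of_map

set_option maxHeartbeats 800000 in
lemma inv_step (gr : PySem.Dict String (String × List (Option String)))
    (dd : PySem.Dict String (Option String)) (ix : PySem.Dict String String)
    (kv : String × Option String) (h : pvInv gr dd ix) :
    pvInv (pvBStep gr kv) (pvAStep (dd, ix) kv).1 (pvAStep (dd, ix) kv).2 := by
  obtain ⟨hix, hdd, hnd, hent⟩ := h
  have hixkeys : ix.keys = gr.keys := by
    simp only [PySem.Dict.keys, hix, List.map_map]; rfl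
  have hddkeys : dd.keys = gr.items.map (fun p => p.2.1) := by
    simp only [PySem.Dict.keys, hdd, List.map_map]; rfl
  simp only [pvAStep, pvBStep]
  by_cases ht : (PySem.Str.strip (if kv.1 == "" then "" else kv.1)) == ""
  · simp only [ht, if_true]
    exact ⟨hix, hdd, hnd, hent⟩
  · simp only [ht, Bool.false_eq_true, if_false]
    generalize PySem.Str.strip (if kv.1 == "" then "" else kv.1) = text at ht ⊢
    generalize hmarker : PySem.Str.lower text = marker at ⊢
    have hixc : ix.contains marker = gr.contains marker := by
      rw [PySem.Dict.contains_eq_decide_mem_keys, PySem.Dict.contains_eq_decide_mem_keys, hixkeys]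
    by_cases hc : gr.contains marker
    · -- existing marker
      obtain ⟨g0, hg0⟩ : ∃ g0, gr.get? marker = some g0 := by
        have := PySem.Dict.contains_eq_isSome_get? (d := gr) (k := marker)
        rw [hc] at this
        exact Option.isSome_iff_exists.mp this.symm
      have hmem : (marker, g0) ∈ gr.items := PySem.Dict.mem_items_of_get?_eq_some gr hg0
      have hlg0 : PySem.Str.lower g0.1 = marker := (hent _ hmem).1
      have hg0ne : g0.2 ≠ [] := (hent _ hmem).2
      have hentry_unique : ∀ p ∈ gr.items, p.1 = marker → p.2 = g0 := by
        intro p hp hpm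
        have : gr.get? marker = some p.2 :=
          PySem.Dict.get?_of_mem_items gr (by rw [← hpm]; exact hp) hnd
        rw [hg0] at this; exact (Option.some.injEq _ _).mp this.symm
      have hcanon_marker : ∀ p ∈ gr.items, p.2.1 = g0.1 → p.1 = marker := by
        intro p hp hpc
        rw [← (hent p hp).1, hpc, hlg0]
      -- existing_key = g0.1
      have hik : ix.get? marker = some g0.1 := by
        apply PySem.Dict.get?_of_mem_items
        · rw [hix]
          exact List.mem_map_of_mem hmem
        · rw [hixkeys]; exact hnd
      -- existing_value = pvChoose g0.2
      have hev : dd.get? g0.1 = some (pvChoose g0.2) := by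
        apply PySem.Dict.get?_of_mem_items
        · rw [hdd]
          exact List.mem_map_of_mem hmem
        · rw [hddkeys]; exact canon_nodup gr hnd hent
      have hddc : dd.contains g0.1 = true := by
        rw [PySem.Dict.contains_eq_isSome_get?, hev]; rfl
      simp only [hixc, hc, if_true, Bool.not_true, Bool.false_eq_true, if_false, hg0, hik, hev,
        Option.getD_some]
      -- B's new groups dict
      have hgr' : (gr.insert marker (g0.1, g0.2 ++ [kv.2])).items
          = gr.items.map (fun p => if p.1 == marker then (marker, (g0.1, g0.2 ++ [kv.2])) else p) :=
        PySem.Dict.items_insert_of_contains _ _ hc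
      obtain ⟨v0, vs0, hvs⟩ : ∃ v0 vs0, g0.2 = v0 :: vs0 := by
        cases hv : g0.2 with
        | nil => exact absurd hv hg0ne
        | cons a l => exact ⟨a, l, rfl⟩
      have hchoose : pvChoose (g0.2 ++ [kv.2])
          = if pvIsBlank (pvChoose g0.2) && !(pvIsBlank kv.2) then kv.2 else pvChoose g0.2 := by
        rw [hvs]; exact choose_append v0 kv.2 vs0
      have hblank_eq : ∀ v : Option String, (v == none || v == some "") = pvIsBlank v := by
        intro v; rfl
      have hinv1 : ix.items = (gr.insert marker (g0.1, g0.2 ++ [kv.2])).items.map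
          (fun p => (p.1, p.2.1)) := by
        rw [hgr', List.map_map, hix]
        apply List.map_congr_left
        intro p hp
        by_cases hpm : p.1 = marker
        · have := hentry_unique p hp hpm
          simp [Function.comp, hpm, this]
        · simp [Function.comp, hpm]
      have hinv3 : (gr.insert marker (g0.1, g0.2 ++ [kv.2])).keys.Nodup :=
        PySem.Dict.nodup_keys_insert _ _ _ hnd
      have hinv4 : ∀ p ∈ (gr.insert marker (g0.1, g0.2 ++ [kv.2])).items,
          PySem.Str.lower p.2.1 = p.1 ∧ p.2.2 ≠ [] := by
        intro p hp
        rcases (PySem.Dict.mem_items_insert _ _ _ _).mp hp with hp1 | ⟨hp2, _⟩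
        · rw [hp1]; exact ⟨hlg0, by simp [hvs]⟩
        · exact hent p hp2
      by_cases hcond : (pvIsBlank (pvChoose g0.2) && !(pvIsBlank kv.2)) = true
      · -- A replaces the stored value
        simp only [hblank_eq, hcond, if_true]
        refine ⟨hinv1, ?_, hinv3, hinv4⟩
        have hddins : (dd.insert g0.1 kv.2).items
            = dd.items.map (fun q => if q.1 == g0.1 then (g0.1, kv.2) else q) :=
          PySem.Dict.items_insert_of_contains _ _ hddc
        rw [hddins, hdd, List.map_map, hgr', List.map_map]
        apply List.map_congr_left
        intro p hp
        by_cases hpm : p.1 = marker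
        · have hpg := hentry_unique p hp hpm
          simp [Function.comp, hpm, hpg, hchoose, hcond]
        · have hpc : p.2.1 ≠ g0.1 := fun hcon => hpm (hcanon_marker p hp hcon)
          simp [Function.comp, hpm, hpc]
      · -- A keeps the stored value
        simp only [hblank_eq, hcond, Bool.false_eq_true, if_false]
        refine ⟨hinv1, ?_, hinv3, hinv4⟩
        rw [hdd, hgr', List.map_map]
        apply List.map_congr_left
        intro p hp
        by_cases hpm : p.1 = marker
        · have hpg := hentry_unique p hp hpm
          simp [Function.comp, hpm, hpg, hchoose, hcond]
        · simp [Function.comp, hpm]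
    · -- new marker
      have hnotmem : marker ∉ gr.keys := by
        rw [← @PySem.Dict.contains_iff_mem_keys] at *
        exact fun hcon => hc hcon
      have hddnc : dd.contains text = false := by
        rw [PySem.Dict.contains_eq_decide_mem_keys, hddkeys, decide_eq_false_iff_not]
        intro hcon
        obtain ⟨p, hp, hpt⟩ := List.mem_map.mp hcon
        apply hnotmem
        have h1 : p.1 = marker := by rw [← (hent p hp).1, hpt, hmarker]
        rw [← h1]
        exact PySem.Dict.mem_keys_of_mem_items gr hp
      have hixnc : ix.contains marker = false := by
        rw [hixc]; exact Bool.not_eq_true _ ▸ (by simpa using hc)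
      simp only [hixc, hc, Bool.false_eq_true, if_false, Bool.not_false, if_true]
      have hgr' := PySem.Dict.items_insert_of_not_contains (d := gr) (k := marker)
        (v := (text, [kv.2])) (by simpa using hc)
      have hix' := PySem.Dict.items_insert_of_not_contains (d := ix) (k := marker)
        (v := text) (by simpa using hixnc)
      have hdd' := PySem.Dict.items_insert_of_not_contains (d := dd) (k := text)
        (v := kv.2) (by simpa using hddnc)
      refine ⟨?_, ?_, ?_, ?_⟩
      · rw [hix', hgr', List.map_append, hix]; rfl
      · rw [hdd', hgr', List.map_append, hdd]
        simp [choose_singleton]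
      · exact PySem.Dict.nodup_keys_insert _ _ _ hnd
      · intro p hp
        rw [hgr'] at hp
        rcases List.mem_append.mp hp with hp1 | hp2
        · exact hent p hp1
        · simp at hp2
          rw [hp2]
          exact ⟨hmarker, by simp⟩

lemma inv_fold (l : List (String × Option String))
    (gr : PySem.Dict String (String × List (Option String)))
    (dd : PySem.Dict String (Option String)) (ix : PySem.Dict String String)
    (h : pvInv gr dd ix) :
    pvInv (l.foldl pvBStep gr) (l.foldl pvAStep (dd, ix)).1 (l.foldl pvAStep (dd, ix)).2 := by
  induction l generalizing gr dd ix with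
  | nil => exact h
  | cons kv rest ih =>
      simpa using ih _ _ _ (inv_step gr dd ix kv h)

-- ===== VERDICT (by name: the statement is the Claim_ definition above) =====
lemma inv_base : pvInv PySem.Dict.empty PySem.Dict.empty PySem.Dict.empty := by
  refine ⟨rfl, rfl, List.nodup_nil, ?_⟩
  intro p hp
  simp [PySem.Dict.empty] at hp

theorem dedupe_casefold_map_py_spec : Claim_equal_dedupe_casefold_map_py := by
  intro m _
  unfold Spec_dedupe_casefold_map_py
  rw [a_eq, b_eq]
  obtain ⟨hix, hdd, hnd, hent⟩ :=
    inv_fold (PySem.Dict.ofList m).items PySem.Dict.empty PySem.Dict.empty PySem.Dict.empty inv_base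
  set gr := (PySem.Dict.ofList m).items.foldl pvBStep PySem.Dict.empty with hgr
  have hcanon := canon_nodup gr hnd hent
  have hvals : gr.values = gr.items.map (fun p => p.2) := rfl
  have hfold := PySem.Dict.items_foldl_insert_fresh gr.values (fun g => g.1)
    (fun g => pvChoose g.2) PySem.Dict.empty
    (fun a _ => PySem.Dict.contains_empty _) (by rw [hvals, List.map_map]; exact hcanon)
  rw [hfold, hdd, hvals, List.map_map]
  rfl
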